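-- pv_equiv track=rewrite | github.com/pypi-data/pypi-mirror-170 | packages/mariqt/mariqt-0.2.69-py3-none-any.whl/mariqt/tests.py | isValidOrcid
-- ===== SOURCE A (Python) =====
-- def isValidOrcid(orcid:str):
-- 	""" returns whether  oricd is valid my using the MOD 11-2 check digit standard """
-- 	# # e.g. "https://orcid.org/0000-0002-9079-593X"
-- 	try:
-- 		orcid = orcid[orcid.rindex("/")+1::]
-- 	except ValueError:
-- 		pass
-- 	if len(orcid) != 19 or orcid[4] != "-" or orcid[9] != "-" or orcid[14] != "-":
-- 		return False
--
-- 	digits = []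
-- 	for char in orcid:
-- 		if char.isdigit():
-- 			digits.append(int(char))
-- 		if char == "X" or char == "x":
-- 			digits.append(10)
--
-- 	if len(digits) != 16:
-- 		return False
--
-- 	# MOD 11-2 (see https://www.sis.se/api/document/preview/605987/)
-- 	M = 11
-- 	r = 2
--
-- 	p = 0
-- 	for digit in digits:
-- 		s = p + digit
-- 		p = s * r
-- 	if s%M == 1:
-- 		return True
--
-- 	return False
-- ===== SOURCE B (Python) =====
-- # ORCID MOD 11-2 validation as a single positional pass: each character is checked
-- # against its expected role in place (dash position or base-11 digit) and a weighted
-- # checksum is accumulated with the precomputed weights 2^(15-j) mod 11, so no digit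
-- # list is collected and no doubling recurrence is run; sum % 11 == 1 iff valid.
-- _WEIGHTS = [10, 5, 8, 4, 2, 1, 6, 3, 7, 9, 10, 5, 8, 4, 2, 1]
--
--
-- def _value(c):
--     """MOD 11-2 value of a base-11 ORCID character, None if it is not one."""
--     if c == "X" or c == "x":
--         return 10
--     if c.isdigit():
--         return int(c)
--     return None
--
--
-- def isValidOrcid(orcid: str):
--     slash = orcid.rfind("/")
--     if slash != -1:
--         orcid = orcid[slash + 1:]
--     if len(orcid) != 19:
--         return False
--     total = 0
--     j = 0
--     for i, c in enumerate(orcid):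
--         if i == 4 or i == 9 or i == 14:
--             if c != "-":
--                 return False
--         else:
--             v = _value(c)
--             if v is None:
--                 return False
--             total += v * _WEIGHTS[j]
--             j += 1
--     return total % 11 == 1
-- ===== Notes on version B (the rewrite author's own statement) =====
-- stated objective: alternative
-- what changed: B replaces A's collect-all-digits pass plus doubling recurrence (p=(p+d)*2 over a 16-element list, then s%11==1) by a single positional pass with early returns: each of the 19 positions is validated in place (dash slot or base-11 digit) and a weighted checksum is accumulated using the precomputed weight table 2^(15-j) mod 11, so no digits list and no recurrence exist.
import Mathlib
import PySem

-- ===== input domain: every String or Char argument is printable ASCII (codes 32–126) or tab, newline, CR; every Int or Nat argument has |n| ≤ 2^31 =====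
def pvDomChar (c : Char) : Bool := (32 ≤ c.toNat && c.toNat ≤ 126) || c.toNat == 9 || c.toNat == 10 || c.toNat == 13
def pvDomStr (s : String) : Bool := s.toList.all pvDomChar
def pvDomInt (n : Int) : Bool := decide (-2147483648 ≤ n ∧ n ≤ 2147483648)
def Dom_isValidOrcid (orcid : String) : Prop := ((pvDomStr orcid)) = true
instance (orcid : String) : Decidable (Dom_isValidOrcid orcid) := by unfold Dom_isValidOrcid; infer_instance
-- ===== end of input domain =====

-- B validates an ORCID in one positional pass with a precomputed 2^(15-j) mod 11 weight
-- table instead of A's collect-the-digits pass followed by the doubling recurrence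
-- (objective: alternative algorithm of the same cost).

-- ===== PORT A =====
def isValidOrcid (orcid : String) : Bool :=
  -- orcid = orcid[orcid.rindex("/")+1::]; a ValueError (no "/") is caught and orcid kept:
  -- rindex equals rfind wherever rindex returns, and rfind signals absence by -1
  let cs0 := orcid.toList
  let idx := PySem.Chars.rfind cs0 ['/']
  let cs := if idx = -1 then cs0 else PySem.List.slice cs0 (some (idx + 1)) none
  if PySem.Chars.len cs ≠ 19 ∨ PySem.List.pyGet? cs 4 ≠ some '-' ∨
     PySem.List.pyGet? cs 9 ≠ some '-' ∨ PySem.List.pyGet? cs 14 ≠ some '-' then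
    false
  else
    -- digits = []; for char in orcid: if char.isdigit(): digits.append(int(char)); if char in "Xx": digits.append(10)
    -- int(char) is PySem.Int.ofChars? [char]; it is some _ under the isdigit guard, so .getD 0 is exact here
    let digits : List Int := cs.foldl (fun acc c =>
      let acc := if PySem.Chars.isdigit c then acc ++ [(PySem.Int.ofChars? [c]).getD 0] else acc
      if c == 'X' || c == 'x' then acc ++ [10] else acc) []
    if digits.length ≠ 16 then false
    else
      -- p = 0; for digit in digits: s = p + digit; p = s * 2 — the fold carries (s, p); Python's s is
      -- unassigned before the loop, but digits has 16 elements so the initial s-component 0 is overwritten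
      let sp := digits.foldl (fun (sp : Int × Int) d => (sp.2 + d, (sp.2 + d) * 2)) (0, 0)
      if PySem.Int.mod sp.1 11 = 1 then true else false

-- ===== PORT B =====
-- _WEIGHTS = [10, 5, 8, 4, 2, 1, 6, 3, 7, 9, 10, 5, 8, 4, 2, 1]
def orcidWeights : List Int := [10, 5, 8, 4, 2, 1, 6, 3, 7, 9, 10, 5, 8, 4, 2, 1]

-- def _value(c): 10 for X/x, int(c) for a digit, else None; int(c) as in port A
def pvValue (c : Char) : Option Int :=
  if c == 'X' || c == 'x' then some 10
  else if PySem.Chars.isdigit c then some ((PySem.Int.ofChars? [c]).getD 0)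
  else none

-- the for-loop over enumerate(orcid) with its early 'return False's: none = an early False,
-- some total = the accumulated weighted checksum; _WEIGHTS[j] is PySem.List.pyGetD (j in range)
def pvAltLoop : List Char → Nat → Nat → Int → Option Int
  | [], _, _, total => some total
  | c :: rest, i, j, total =>
    if i == 4 || i == 9 || i == 14 then
      if c == '-' then pvAltLoop rest (i + 1) j total else none
    else
      (pvValue c).bind fun v =>
        pvAltLoop rest (i + 1) (j + 1) (total + v * PySem.List.pyGetD orcidWeights (j : Int) 0)

def isValidOrcid_alt (orcid : String) : Bool :=
  let cs0 := orcid.toList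
  let slash := PySem.Chars.rfind cs0 ['/']
  let cs := if slash ≠ -1 then PySem.List.slice cs0 (some (slash + 1)) none else cs0
  if PySem.Chars.len cs ≠ 19 then false
  else
    match pvAltLoop cs 0 0 0 with
    | none => false
    | some total => decide (PySem.Int.mod total 11 = 1)

-- ===== PRECONDITION & SPEC =====
def Spec_isValidOrcid (orcid : String) (out : Bool) : Prop := out = isValidOrcid_alt orcid
instance (orcid : String) (out : Bool) : Decidable (Spec_isValidOrcid orcid out) := by unfold Spec_isValidOrcid; infer_instance

-- ===== CLAIM (what is proved, stated in full; the proofs are below) =====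
def Claim_equal_isValidOrcid : Prop := ∀ (orcid : String), Dom_isValidOrcid orcid → Spec_isValidOrcid orcid (isValidOrcid orcid)

-- ===== LEMMAS AND PROOFS =====

-- a decimal digit character is neither 'X' nor 'x'
lemma isdigit_not_Xx (c : Char) (h : PySem.Chars.isdigit c = true) : (c == 'X' || c == 'x') = false := by
  simp [PySem.Chars.isdigit] at h
  by_cases hX : c = 'X'
  · subst hX; simp at h
  · by_cases hx : c = 'x'
    · subst hx; simp at h
    · simp [hX, hx]

-- A's two-append digit loop collects exactly filterMap pvValue
lemma digits_loop_eq_filterMap (cs : List Char) (acc : List Int) :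
    cs.foldl (fun acc c =>
        let acc := if PySem.Chars.isdigit c then acc ++ [(PySem.Int.ofChars? [c]).getD 0] else acc
        if c == 'X' || c == 'x' then acc ++ [10] else acc) acc
    = acc ++ cs.filterMap pvValue := by
  induction cs generalizing acc with
  | nil => simp
  | cons c cs ih =>
    rw [List.foldl_cons, List.filterMap_cons, ih]
    by_cases hd : PySem.Chars.isdigit c = true
    · have hx := isdigit_not_Xx c hd
      simp [pvValue, hd, hx]
    · by_cases hx : (c == 'X' || c == 'x') = true
      · simp [pvValue, hd, hx]
      · simp [pvValue, hd, hx]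

lemma pvValue_dash : pvValue '-' = none := by decide

-- collect the values of all characters, or none if some character is not a base-11 digit
def pvAllvals : List Char → Option (List Int)
  | [] => some []
  | c :: cs => (pvValue c).bind fun v => (pvAllvals cs).map fun vs => v :: vs

-- B's weighted checksum of a value list, weights taken from index j on
def pvWsum : List Int → Nat → Int
  | [], _ => 0
  | v :: vs, j => v * PySem.List.pyGetD orcidWeights (j : Int) 0 + pvWsum vs (j + 1)

-- A's checksum: Σ v_i * 2^(len-1-i)
def pvEsum : List Int → Int
  | [] => 0
  | v :: vs => v * 2 ^ vs.length + pvEsum vs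

-- the index-free core of B's loop (the dash branches stripped away)
def pvLoop : List Char → Nat → Int → Option Int
  | [], _, total => some total
  | c :: rest, j, total =>
    (pvValue c).bind fun v =>
      pvLoop rest (j + 1) (total + v * PySem.List.pyGetD orcidWeights (j : Int) 0)

lemma pvLoop_allvals (cs : List Char) : ∀ (j : Nat) (total : Int),
    pvLoop cs j total = (pvAllvals cs).map fun vs => total + pvWsum vs j := by
  induction cs with
  | nil => intro j total; simp [pvLoop, pvAllvals, pvWsum]
  | cons c cs ih =>
    intro j total
    cases hv : pvValue c with
    | none => simp [pvLoop, pvAllvals, hv]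
    | some v =>
      cases ha : pvAllvals cs with
      | none => simp [pvLoop, pvAllvals, hv, ha, ih]
      | some vs => simp [pvLoop, pvAllvals, hv, ha, ih, pvWsum]; ring

lemma allvals_some (cs : List Char) : ∀ vs, pvAllvals cs = some vs →
    cs.filterMap pvValue = vs ∧ vs.length = cs.length := by
  induction cs with
  | nil => intro vs h; simp [pvAllvals] at h; simp [← h]
  | cons c cs ih =>
    intro vs h
    cases hv : pvValue c with
    | none => simp [pvAllvals, hv] at h
    | some v =>
      cases ha : pvAllvals cs with
      | none => simp [pvAllvals, hv, ha] at h
      | some ws =>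
        simp [pvAllvals, hv, ha] at h
        obtain ⟨h1, h2⟩ := ih ws ha
        simp [← h, hv, h1, h2]

lemma allvals_none (cs : List Char) (h : pvAllvals cs = none) :
    (cs.filterMap pvValue).length < cs.length := by
  induction cs with
  | nil => simp [pvAllvals] at h
  | cons c cs ih =>
    cases hv : pvValue c with
    | none =>
      have h1 := List.length_filterMap_le pvValue cs
      have h2 : (c :: cs).filterMap pvValue = cs.filterMap pvValue := by
        simp [hv]
      rw [h2]; simp only [List.length_cons]; omega
    | some v =>
      cases ha : pvAllvals cs with
      | none =>
        have h1 := ih ha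
        have h2 : (c :: cs).filterMap pvValue = v :: cs.filterMap pvValue := by
          simp [hv]
        rw [h2]; simp only [List.length_cons]; omega
      | some ws => simp [pvAllvals, hv, ha] at h

-- A's (s,p) fold: the s component is the power-weighted sum
lemma pairfold_fst (vs : List Int) : ∀ (s0 p0 : Int), vs ≠ [] →
    (vs.foldl (fun (sp : Int × Int) d => (sp.2 + d, (sp.2 + d) * 2)) (s0, p0)).1
      = p0 * 2 ^ (vs.length - 1) + pvEsum vs := by
  induction vs with
  | nil => intro _ _ h; exact absurd rfl h
  | cons v vs ih =>
    intro s0 p0 _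
    cases vs with
    | nil => simp [pvEsum]
    | cons w ws =>
      rw [List.foldl_cons, ih (p0 + v) ((p0 + v) * 2) (by simp)]
      simp [pvEsum, pow_succ]
      ring

-- the table weight at j is 2^(15-j) mod 11
lemma wsum_modeq_esum (vs : List Int) : ∀ (j : Nat), j + vs.length = 16 →
    Int.ModEq 11 (pvWsum vs j) (pvEsum vs) := by
  induction vs with
  | nil => intro j _; rfl
  | cons v vs ih =>
    intro j h
    have hj : j ≤ 15 := by simp at h; omega
    have hw : Int.ModEq 11 (PySem.List.pyGetD orcidWeights (j : Int) 0) (2 ^ vs.length) := by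
      rw [show vs.length = 15 - j from by simp at h; omega]
      interval_cases j <;> decide
    exact Int.ModEq.add (Int.ModEq.mul_left v hw) (ih (j + 1) (by simp at h ⊢; omega))

-- final checksum comparison, for any value list of length 16
lemma checksum_eq (vs : List Int) (h16 : vs.length = 16) :
    (if PySem.Int.mod (vs.foldl (fun (sp : Int × Int) d => (sp.2 + d, (sp.2 + d) * 2)) (0, 0)).1 11 = 1
       then true else false)
    = decide (PySem.Int.mod (0 + pvWsum vs 0) 11 = 1) := by
  have hne : vs ≠ [] := by intro h; simp [h] at h16
  rw [pairfold_fst vs 0 0 hne]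
  have hmod : PySem.Int.mod (pvEsum vs) 11 = PySem.Int.mod (pvWsum vs 0) 11 := by
    rw [PySem.Int.mod_eq_emod_of_pos (by norm_num), PySem.Int.mod_eq_emod_of_pos (by norm_num)]
    exact (wsum_modeq_esum vs 0 (by omega)).symm
  have key : (PySem.Int.mod (pvEsum vs) 11 = 1) ↔ (PySem.Int.mod (pvWsum vs 0) 11 = 1) := by
    rw [hmod]
  simp only [zero_mul, zero_add]
  by_cases h : PySem.Int.mod (pvEsum vs) 11 = 1
  · rw [if_pos h]; exact (decide_eq_true (key.mp h)).symm
  · rw [if_neg h]; exact (decide_eq_false (fun hb => h (key.mpr hb))).symm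

-- if B's loop returns a value, every absolute dash position held a '-'
lemma altLoop_some_dash (cs : List Char) : ∀ (i j : Nat) (total : Int) (t : Int),
    pvAltLoop cs i j total = some t →
    ∀ (k : Nat) (hk : k < cs.length), (i + k = 4 ∨ i + k = 9 ∨ i + k = 14) → cs[k] = '-' := by
  induction cs with
  | nil => intro _ _ _ _ _ k hk; simp at hk
  | cons c cs ih =>
    intro i j total t ht k hk hdash
    by_cases hi : (i == 4 || i == 9 || i == 14) = true
    · rw [pvAltLoop, if_pos hi] at ht
      by_cases hc : (c == '-') = true
      · rw [if_pos hc] at ht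
        cases k with
        | zero => simpa using hc
        | succ k => exact ih (i + 1) j total t ht k (by simpa using hk) (by omega)
      · rw [if_neg hc] at ht; exact absurd ht (by simp)
    · rw [pvAltLoop, if_neg hi] at ht
      cases hv : pvValue c with
      | none => rw [hv] at ht; exact absurd ht (by simp)
      | some v =>
        rw [hv] at ht
        cases k with
        | zero =>
          simp at hi
          omega
        | succ k =>
          exact ih (i + 1) (j + 1) _ t ht k (by simpa using hk) (by omega)

-- the two programs agree once the candidate character list cs is fixed
lemma tail_eq (cs : List Char) :
    (if PySem.Chars.len cs ≠ 19 ∨ PySem.List.pyGet? cs 4 ≠ some '-' ∨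
        PySem.List.pyGet? cs 9 ≠ some '-' ∨ PySem.List.pyGet? cs 14 ≠ some '-' then
      false
    else
      let digits : List Int := cs.foldl (fun acc c =>
        let acc := if PySem.Chars.isdigit c then acc ++ [(PySem.Int.ofChars? [c]).getD 0] else acc
        if c == 'X' || c == 'x' then acc ++ [10] else acc) []
      if digits.length ≠ 16 then false
      else
        let sp := digits.foldl (fun (sp : Int × Int) d => (sp.2 + d, (sp.2 + d) * 2)) (0, 0)
        if PySem.Int.mod sp.1 11 = 1 then true else false)
    = (if PySem.Chars.len cs ≠ 19 then false
      else
        match pvAltLoop cs 0 0 0 with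
        | none => false
        | some total => decide (PySem.Int.mod total 11 = 1)) := by
  by_cases hlen : PySem.Chars.len cs = 19
  · have hl : cs.length = 19 := by
      have h := hlen; rw [PySem.Chars.len_eq] at h; exact_mod_cast h
    rcases cs with _|⟨c0,cs⟩; · simp at hl
    rcases cs with _|⟨c1,cs⟩; · simp at hl
    rcases cs with _|⟨c2,cs⟩; · simp at hl
    rcases cs with _|⟨c3,cs⟩; · simp at hl
    rcases cs with _|⟨c4,cs⟩; · simp at hl
    rcases cs with _|⟨c5,cs⟩; · simp at hl
    rcases cs with _|⟨c6,cs⟩; · simp at hl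
    rcases cs with _|⟨c7,cs⟩; · simp at hl
    rcases cs with _|⟨c8,cs⟩; · simp at hl
    rcases cs with _|⟨c9,cs⟩; · simp at hl
    rcases cs with _|⟨c10,cs⟩; · simp at hl
    rcases cs with _|⟨c11,cs⟩; · simp at hl
    rcases cs with _|⟨c12,cs⟩; · simp at hl
    rcases cs with _|⟨c13,cs⟩; · simp at hl
    rcases cs with _|⟨c14,cs⟩; · simp at hl
    rcases cs with _|⟨c15,cs⟩; · simp at hl
    rcases cs with _|⟨c16,cs⟩; · simp at hl
    rcases cs with _|⟨c17,cs⟩; · simp at hl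
    rcases cs with _|⟨c18,cs⟩; · simp at hl
    rcases cs with _|⟨c19,cs⟩
    · rw [if_neg (show ¬ PySem.Chars.len [c0, c1, c2, c3, c4, c5, c6, c7, c8, c9, c10, c11, c12,
          c13, c14, c15, c16, c17, c18] ≠ 19 from fun h => h hlen)]
      by_cases hdash : c4 = '-' ∧ c9 = '-' ∧ c14 = '-'
      · obtain ⟨h4, h9, h14⟩ := hdash
        subst h4 h9 h14
        rw [if_neg (show ¬ (PySem.Chars.len [c0, c1, c2, c3, '-', c5, c6, c7, c8, '-', c10, c11,
            c12, c13, '-', c15, c16, c17, c18] ≠ 19 ∨ _ ∨ _ ∨ _) from by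
          intro h
          rcases h with h|h|h|h
          · exact h hlen
          · exact h rfl
          · exact h rfl
          · exact h rfl)]
        rw [digits_loop_eq_filterMap]
        have hfm : [c0, c1, c2, c3, '-', c5, c6, c7, c8, '-', c10, c11, c12, c13, '-',
            c15, c16, c17, c18].filterMap pvValue
            = [c0, c1, c2, c3, c5, c6, c7, c8, c10, c11, c12, c13, c15, c16, c17,
               c18].filterMap pvValue := by
          simp [List.filterMap_cons, pvValue_dash]
        have hloop : pvAltLoop [c0, c1, c2, c3, '-', c5, c6, c7, c8, '-', c10, c11, c12, c13, '-',
            c15, c16, c17, c18] 0 0 0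
            = pvLoop [c0, c1, c2, c3, c5, c6, c7, c8, c10, c11, c12, c13, c15, c16, c17,
               c18] 0 0 := by
          rfl
        rw [hloop, pvLoop_allvals]
        cases hav : pvAllvals [c0, c1, c2, c3, c5, c6, c7, c8, c10, c11, c12, c13, c15, c16, c17, c18] with
        | none =>
          have hlt := allvals_none _ hav
          simp only [List.length_cons, List.length_nil] at hlt
          simp only [List.nil_append, hfm]
          rw [if_pos (show (List.filterMap pvValue [c0, c1, c2, c3, c5, c6, c7, c8, c10, c11, c12,
            c13, c15, c16, c17, c18]).length ≠ 16 from by omega)]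
          rfl
        | some vs =>
          obtain ⟨hfm2, hlen2⟩ := allvals_some _ vs hav
          simp only [List.length_cons, List.length_nil] at hlen2
          simp only [List.nil_append, hfm, hfm2]
          rw [if_neg (show ¬ vs.length ≠ 16 from fun h => h hlen2)]
          exact checksum_eq vs hlen2
      · rw [if_pos (by
          rcases (by tauto : ¬ c4 = '-' ∨ ¬ c9 = '-' ∨ ¬ c14 = '-') with h | h | h
          · right; left; intro hc; apply h
            have : some c4 = some '-' := by rw [← hc]; rfl
            exact Option.some.inj this
          · right; right; left; intro hc; apply h
            have : some c9 = some '-' := by rw [← hc]; rfl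
            exact Option.some.inj this
          · right; right; right; intro hc; apply h
            have : some c14 = some '-' := by rw [← hc]; rfl
            exact Option.some.inj this)]
        cases hres : pvAltLoop [c0, c1, c2, c3, c4, c5, c6, c7, c8, c9, c10, c11, c12, c13, c14,
            c15, c16, c17, c18] 0 0 0 with
        | none => rfl
        | some t =>
          exfalso
          have hd := altLoop_some_dash _ 0 0 0 t hres
          exact hdash ⟨hd 4 (by simp) (by omega), hd 9 (by simp) (by omega),
            hd 14 (by simp) (by omega)⟩
    · simp at hl
  · rw [if_pos (Or.inl hlen), if_pos hlen]

theorem isValidOrcid_eq (orcid : String) : isValidOrcid orcid = isValidOrcid_alt orcid := by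
  unfold isValidOrcid isValidOrcid_alt
  by_cases hidx : PySem.Chars.rfind orcid.toList ['/'] = -1
  · simp only [hidx, ne_eq, not_true_eq_false, if_true, if_false]
    exact tail_eq orcid.toList
  · simp only [hidx, ne_eq, not_false_eq_true, if_true, if_false]
    exact tail_eq (PySem.List.slice orcid.toList (some (PySem.Chars.rfind orcid.toList ['/'] + 1)) none)

-- ===== VERDICT (by name: the statement is the Claim_ definition above) =====
theorem isValidOrcid_spec : Claim_equal_isValidOrcid := by
  intro orcid _
  unfold Spec_isValidOrcid
  exact isValidOrcid_eq orcid
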